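-- pv_equiv track=rewrite | github.com/tinchopmanya/collatz | experiments/analyze_m18_ratio_by_range.py | odd_chain_blocks
-- ===== SOURCE A (Python) =====
-- def odd_chain_blocks(n, max_blocks=256):
--     if n % 2 == 0 or n < 3:
--         return 0
--     current = n
--     for b in range(1, max_blocks + 1):
--         temp = current + 1
--         tail = 0
--         while temp % 2 == 0:
--             tail += 1
--             temp //= 2
--         q = temp
--         a = q * (3 ** tail)
--         temp2 = a - 1
--         exit_v2 = 0
--         while temp2 % 2 == 0:
--             exit_v2 += 1
--             temp2 //= 2
--         if temp2 < n:
--             return b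
--         current = temp2
--     return max_blocks
-- ===== SOURCE B (Python) =====
-- def odd_chain_blocks(n, max_blocks=256):
--     if n % 2 == 0 or n < 3:
--         return 0
--
--     def go(current, b):
--         if b > max_blocks:
--             return max_blocks
--         t = current + 1
--         tail = (t & -t).bit_length() - 1          # 2-adic valuation, closed form
--         t2 = (t >> tail) * 3 ** tail - 1
--         t2 >>= (t2 & -t2).bit_length() - 1        # strip trailing zeros, closed form
--         return b if t2 < n else go(t2, b + 1)
--
--     return go(n, 1)
-- ===== Notes on version B (the rewrite author's own statement) =====
-- stated objective: alternative
-- what changed: Both inner while-loops that strip factors of two are replaced by closed-form bit operations ((x & -x).bit_length() - 1 and a single shift), and the counted for-loop over blocks becomes a recursive helper; the unused exit_v2 counter is dropped.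
import Mathlib
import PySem

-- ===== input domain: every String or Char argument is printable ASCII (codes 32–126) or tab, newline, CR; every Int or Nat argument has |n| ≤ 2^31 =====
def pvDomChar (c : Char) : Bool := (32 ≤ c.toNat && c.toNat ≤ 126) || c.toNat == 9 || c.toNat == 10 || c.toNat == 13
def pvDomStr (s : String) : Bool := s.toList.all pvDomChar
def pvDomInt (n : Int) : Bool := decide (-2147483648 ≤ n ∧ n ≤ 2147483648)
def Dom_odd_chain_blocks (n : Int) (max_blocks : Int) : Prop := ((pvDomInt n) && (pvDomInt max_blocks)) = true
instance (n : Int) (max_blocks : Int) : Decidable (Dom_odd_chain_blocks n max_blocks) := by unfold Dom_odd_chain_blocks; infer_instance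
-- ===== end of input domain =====

-- B replaces both inner strip-factors-of-two while-loops by closed-form bit operations
-- ((x & -x).bit_length() - 1 and one shift) and turns the counted block loop into recursion.


-- ===== PORT A =====
-- `while temp % 2 == 0: tail += 1; temp //= 2`; the `t ≠ 0` guard only totalizes the
-- port (Python would loop forever at t = 0, a state no admitted input reaches).
def pvStrip (t : Int) (c : Int) : Int × Int :=
  if h : t ≠ 0 ∧ PySem.Int.mod t 2 = 0 then pvStrip (PySem.Int.floordiv t 2) (c + 1)
  else (t, c)
termination_by t.natAbs
decreasing_by
  obtain ⟨hne, hmod⟩ := h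
  obtain ⟨c', rfl⟩ := (PySem.Int.mod_eq_zero_iff_dvd t 2).1 hmod
  rw [PySem.Int.floordiv_eq_ediv_of_pos (by norm_num), Int.mul_ediv_cancel_left _ (by norm_num)]
  simp [Int.natAbs_mul] at *
  omega

-- `for b in range(1, max_blocks + 1)` with the loop body; the second strip loop's
-- counter (Python's unused exit_v2) is the second component of p2.
def pvLoopA (n : Int) (mb : Int) : List Int → Int → Int
  | [], _ => mb
  | b :: rest, current =>
    let p := pvStrip (current + 1) 0
    let a := p.1 * 3 ^ p.2.toNat
    let p2 := pvStrip (a - 1) 0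
    if p2.1 < n then b else pvLoopA n mb rest p2.1

def odd_chain_blocks (n : Int) (max_blocks : Int) : Int :=
  if PySem.Int.mod n 2 = 0 ∨ n < 3 then 0
  else pvLoopA n max_blocks (PySem.List.pyRange 1 (max_blocks + 1) 1) n

-- ===== PORT B =====
-- `(t & -t).bit_length() - 1`; the Nat subtraction clamps t = 0 (where Python's
-- bit_length() - 1 is -1 and the subsequent shift would raise), unreachable here.
def pvTail (t : Int) : Nat := PySem.Int.bitLength (PySem.Int.band t (-t)) - 1

def pvGo (n : Int) (mb : Int) (current b : Int) : Int :=
  if b > mb then mb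
  else
    let t := current + 1
    let tail := pvTail t
    let t2 := (t >>> tail) * 3 ^ tail - 1
    let t2' := t2 >>> pvTail t2
    if t2' < n then b else pvGo n mb t2' (b + 1)
termination_by (mb + 1 - b).toNat
decreasing_by omega

def odd_chain_blocks_alt (n : Int) (max_blocks : Int) : Int :=
  if PySem.Int.mod n 2 = 0 ∨ n < 3 then 0
  else pvGo n max_blocks n 1

-- ===== PRECONDITION & SPEC =====
def Spec_odd_chain_blocks (n : Int) (max_blocks : Int) (out : Int) : Prop := out = odd_chain_blocks_alt n max_blocks
instance (n : Int) (max_blocks : Int) (out : Int) : Decidable (Spec_odd_chain_blocks n max_blocks out) := by unfold Spec_odd_chain_blocks; infer_instance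

-- ===== CLAIM (what is proved, stated in full; the proofs are below) =====
def Claim_equal_odd_chain_blocks : Prop := ∀ (n : Int) (max_blocks : Int), Dom_odd_chain_blocks n max_blocks → Spec_odd_chain_blocks n max_blocks (odd_chain_blocks n max_blocks)

-- ===== LEMMAS AND PROOFS =====

-- (2u+1) &&& 2u = 2u
theorem pv_land_odd (u : Nat) : (2*u+1) &&& (2*u) = 2*u := by
  apply Nat.eq_of_testBit_eq; intro i
  cases i with
  | zero => simp [Nat.testBit_zero]
  | succ j =>
    rw [Nat.testBit_land, Nat.testBit_succ, Nat.testBit_succ]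
    have h1 : (2*u+1)/2 = u := by omega
    have h2 : (2*u)/2 = u := by omega
    rw [h1, h2, Bool.and_self]

theorem pv_land_dbl (t : Nat) (h : 1 ≤ t) : (2*t) &&& (2*t-1) = 2*(t &&& (t-1)) := by
  apply Nat.eq_of_testBit_eq; intro i
  cases i with
  | zero => simp [Nat.testBit_zero]
  | succ j =>
    rw [Nat.testBit_land, Nat.testBit_succ, Nat.testBit_succ, Nat.testBit_succ]
    have h1 : (2*t)/2 = t := by omega
    have h2 : (2*t-1)/2 = t-1 := by omega
    have h3 : (2*(t &&& (t-1)))/2 = t &&& (t-1) := by omega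
    rw [h1, h2, h3, Nat.testBit_land]

-- s - (s &&& (s-1)) is the lowest set bit
theorem pv_lowbit (k m : Nat) (hm : m % 2 = 1) :
    2^k*m - (2^k*m &&& (2^k*m-1)) = 2^k := by
  induction k with
  | zero =>
    simp only [pow_zero, one_mul]
    obtain ⟨u, hu⟩ : ∃ u, m = 2*u+1 := ⟨m/2, by omega⟩
    subst hu
    have h : 2*u+1-1 = 2*u := by omega
    rw [h, pv_land_odd]; omega
  | succ k ih =>
    have hpos : 1 ≤ 2^k*m := Nat.one_le_iff_ne_zero.2 (Nat.mul_ne_zero (by positivity) (by omega))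
    have h1 : 2^(k+1)*m = 2*(2^k*m) := by ring
    rw [h1, pv_land_dbl _ hpos]
    have hle : (2^k*m) &&& (2^k*m-1) ≤ 2^k*m := Nat.and_le_left
    have hp : (2:Nat)^(k+1) = 2*2^k := by ring
    omega

theorem pv_bl_pow (k : Nat) : PySem.Int.bitLength ((2:Int)^k) = k+1 := by
  induction k with
  | zero => decide
  | succ k ih =>
    have h : ((2:Int)^(k+1)) = (((2^(k+1) : Nat) : Int)) := by push_cast; ring
    rw [h, PySem.Int.bitLength_natCast (by positivity)]
    have h2 : (2^(k+1) : Nat)/2 = 2^k := by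
      rw [pow_succ, Nat.mul_div_cancel]; omega
    rw [h2]
    have h3 : (((2^k : Nat)) : Int) = (2:Int)^k := by push_cast; ring
    rw [h3, ih]

-- band t (-t) for positive t, reduced to the Nat lowbit
theorem pv_band_neg (k : Nat) (m : Int) (hm : m % 2 = 1) (hpos : 0 < m) :
    PySem.Int.band (2^k*m) (-(2^k*m)) = 2^k := by
  set t : Int := 2^k*m with ht
  have htpos : 0 < t := by positivity
  have h1 : ¬ (0 ≤ -t) := by omega
  rw [PySem.Int.band, if_pos (by omega : (0:Int) ≤ t), if_neg h1]
  have h2 : -(-t) - 1 = t - 1 := by ring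
  rw [h2]
  have h3 : t.toNat = 2^k * m.toNat := by
    have hNat : t = ((2^k * m.toNat : Nat) : Int) := by
      push_cast; rw [ht]; congr 1; omega
    rw [hNat, Int.toNat_natCast]
  have h4 : (t-1).toNat = 2^k * m.toNat - 1 := by omega
  rw [h3, h4, pv_lowbit k m.toNat (by omega)]
  push_cast; ring

theorem pv_strip_eq (k : Nat) (m c : Int) (hm : m % 2 = 1) :
    pvStrip (2^k*m) c = (m, c + k) := by
  induction k generalizing c with
  | zero =>
    rw [pvStrip.eq_def, dif_neg]
    · simp
    · rintro ⟨_, hmod⟩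
      rw [PySem.Int.mod_eq_emod_of_pos (by norm_num)] at hmod
      simp only [pow_zero, one_mul] at hmod
      omega
  | succ k ih =>
    have hne : (2:Int)^(k+1)*m ≠ 0 := by
      have : (0:Int) < 2^(k+1) := by positivity
      intro h; rw [mul_eq_zero] at h; omega
    have hmod : PySem.Int.mod ((2:Int)^(k+1)*m) 2 = 0 := by
      rw [PySem.Int.mod_eq_zero_iff_dvd]
      exact ⟨2^k*m, by ring⟩
    rw [pvStrip.eq_def, dif_pos ⟨hne, hmod⟩,
        PySem.Int.floordiv_eq_ediv_of_pos (by norm_num)]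
    have h2 : (2:Int)^(k+1)*m = 2*(2^k*m) := by ring
    rw [h2, Int.mul_ediv_cancel_left _ (by norm_num), ih _]
    have : c + 1 + (k:Int) = c + ((k:Nat)+1 : Nat) := by push_cast; ring
    rw [this]

-- shifting the power back out
theorem pv_shift_eq (k : Nat) (m : Int) : ((2:Int)^k*m) >>> k = m := by
  rw [Int.shiftRight_eq_div_pow]
  have h : ((2^k : Nat) : Int) = (2:Int)^k := by push_cast; ring
  rw [h, Int.mul_ediv_cancel_left _ (by positivity)]

theorem pv_tail_eq (k : Nat) (m : Int) (hm : m % 2 = 1) (hpos : 0 < m) :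
    pvTail (2^k*m) = k := by
  rw [pvTail, pv_band_neg k m hm hpos, pv_bl_pow]
  omega

-- decompose a positive even-or-odd integer as 2^k * odd
theorem pv_decomp (t : Int) (h : 0 < t) :
    ∃ (k : Nat) (m : Int), m % 2 = 1 ∧ 0 < m ∧ t = 2^k*m := by
  obtain ⟨k, m0, hodd, hEq⟩ := Nat.exists_eq_two_pow_mul_odd (n := t.toNat) (by omega)
  obtain ⟨j, hj⟩ := hodd
  refine ⟨k, (m0 : Int), by omega, by omega, ?_⟩
  have hp : ((2:Int)^k) = ((2^k : Nat) : Int) := by push_cast; ring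
  have h2 : ((t.toNat : Int)) = ((2^k : Nat) : Int) * (m0 : Int) := by
    exact_mod_cast congrArg (fun x : Nat => (x : Int)) hEq
  rw [hp, ← Int.toNat_of_nonneg (le_of_lt h)]
  exact h2

theorem pv_three_pow_odd (k : Nat) : (3:Int)^k % 2 = 1 := by
  induction k with
  | zero => decide
  | succ j ihj => rw [pow_succ, Int.mul_emod, ihj]; decide

-- proof-side name for the body of one pvGo step (B's t2 after its final shift)
def pvStep (current : Int) : Int :=
  (((current + 1) >>> pvTail (current + 1)) * 3 ^ pvTail (current + 1) - 1) >>>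
    pvTail (((current + 1) >>> pvTail (current + 1)) * 3 ^ pvTail (current + 1) - 1)

theorem pvGo_unfold (n mb current b : Int) :
    pvGo n mb current b =
      if b > mb then mb
      else if pvStep current < n then b else pvGo n mb (pvStep current) (b + 1) := by
  rw [pvGo, pvStep]

-- the loops agree, by induction on the number of remaining blocks
theorem pv_main (fuel : Nat) : ∀ (n mb current b : Int),
    (mb + 1 - b).toNat = fuel → current % 2 = 1 → 0 < current →
    pvLoopA n mb (PySem.List.pyRange b (mb+1) 1) current = pvGo n mb current b := by
  induction fuel with
  | zero =>
    intro n mb current b hf _ _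
    rw [PySem.List.pyRange_one_eq_nil (by omega), pvLoopA, pvGo_unfold, if_pos (by omega)]
  | succ f ih =>
    intro n mb current b hf hodd hpos
    by_cases hb : b > mb
    · rw [PySem.List.pyRange_one_eq_nil (by omega), pvLoopA, pvGo_unfold, if_pos hb]
    · rw [PySem.List.pyRange_one_cons (by omega), pvLoopA, pvGo_unfold, if_neg hb]
      obtain ⟨k, m, hm, hmp, hEq⟩ := pv_decomp (current + 1) (by omega)
      have hk : 1 ≤ k := by
        rcases Nat.eq_zero_or_pos k with h0 | h1
        · exfalso; rw [h0] at hEq; simp at hEq; omega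
        · exact h1
      -- the intermediate value a = m * 3^k is odd and ≥ 3
      have hao : (m * 3^k) % 2 = 1 := by
        have h3 : (3:Int)^k % 2 = 1 := pv_three_pow_odd k
        rw [Int.mul_emod, h3]
        omega
      have hage : 3 ≤ m * 3^k := by
        have h3 : (3:Int)^1 ≤ 3^k := pow_le_pow_right₀ (by norm_num) hk
        have h4 : 1 * 3^k ≤ m * 3^k :=
          mul_le_mul_of_nonneg_right (by omega) (by positivity)
        simp only [pow_one] at h3
        omega
      obtain ⟨k2, m2, hm2, hm2p, hEq2⟩ := pv_decomp (m * 3^k - 1) (by omega)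
      have hstep : pvStep current = m2 := by
        rw [pvStep, hEq, pv_tail_eq k m hm hmp, pv_shift_eq, hEq2,
            pv_tail_eq k2 m2 hm2 hm2p, pv_shift_eq]
      rw [hstep, hEq, pv_strip_eq k m 0 hm]
      simp only [zero_add, Int.toNat_natCast]
      rw [hEq2, pv_strip_eq k2 m2 0 hm2]
      by_cases hlt : m2 < n
      · simp [hlt]
      · simp only [if_neg hlt]
        exact ih n mb m2 (b+1) (by omega) (by omega) hm2p

-- ===== VERDICT (by name: the statement is the Claim_ definition above) =====
theorem odd_chain_blocks_spec : Claim_equal_odd_chain_blocks := by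
  intro n mb _
  unfold Spec_odd_chain_blocks odd_chain_blocks odd_chain_blocks_alt
  by_cases hg : PySem.Int.mod n 2 = 0 ∨ n < 3
  · rw [if_pos hg, if_pos hg]
  · rw [if_neg hg, if_neg hg]
    have h1 : PySem.Int.mod n 2 ≠ 0 := fun h => hg (Or.inl h)
    have h3 : ¬ n < 3 := fun h => hg (Or.inr h)
    rw [PySem.Int.mod_eq_emod_of_pos (by norm_num)] at h1
    exact pv_main (mb + 1 - 1).toNat n mb n 1 rfl (by omega) (by omega)
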